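-- pv_equiv track=rewrite | github.com/yih789/Coding-TEST | p201/main.py | maximum_lenth
-- ===== SOURCE A (Python) =====
-- def maximum_lenth(arr, leng, start, end):
--   while(start <= end):
--     total = 0
--     mid = ( start + end ) // 2
--
--     for lenth in arr:
--       if( lenth > mid):
--         total += lenth - mid
--
--     if(total == leng):
--       return mid
--     elif(total > leng):
--       start = mid + 1
--     else:
--       end = mid - 1
--   return None
-- ===== SOURCE B (Python) =====
-- def _bisect_right(s, x, n):
--     # index of first element of sorted s that is > x
--     lo, hi = 0, n
--     while lo < hi:
--         m = (lo + hi) // 2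
--         if s[m] <= x:
--             lo = m + 1
--         else:
--             hi = m
--     return lo
--
--
-- def maximum_lenth(arr, leng, start, end):
--     # Sort once and build prefix sums, so each probe of the binary search
--     # costs O(log n) (an inner bisect) instead of a full O(n) scan.
--     s = sorted(arr)
--     n = len(s)
--     pre = [0]
--     acc = 0
--     for v in s:
--         acc += v
--         pre.append(acc)
--     total_sum = acc
--     while start <= end:
--         mid = (start + end) // 2
--         i = _bisect_right(s, mid, n)
--         total = (total_sum - pre[i]) - (n - i) * mid
--         if total == leng:
--             return mid
--         elif total > leng:
--             start = mid + 1
--         else: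
--             end = mid - 1
--     return None
-- ===== Notes on version B (the rewrite author's own statement) =====
-- stated objective: faster
-- what changed: B sorts the array once and builds prefix sums, then the same binary search over the cutoff evaluates each probe's excess total with a hand-written bisect in O(log n) instead of A's full O(n) scan of the array.
import Mathlib
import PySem

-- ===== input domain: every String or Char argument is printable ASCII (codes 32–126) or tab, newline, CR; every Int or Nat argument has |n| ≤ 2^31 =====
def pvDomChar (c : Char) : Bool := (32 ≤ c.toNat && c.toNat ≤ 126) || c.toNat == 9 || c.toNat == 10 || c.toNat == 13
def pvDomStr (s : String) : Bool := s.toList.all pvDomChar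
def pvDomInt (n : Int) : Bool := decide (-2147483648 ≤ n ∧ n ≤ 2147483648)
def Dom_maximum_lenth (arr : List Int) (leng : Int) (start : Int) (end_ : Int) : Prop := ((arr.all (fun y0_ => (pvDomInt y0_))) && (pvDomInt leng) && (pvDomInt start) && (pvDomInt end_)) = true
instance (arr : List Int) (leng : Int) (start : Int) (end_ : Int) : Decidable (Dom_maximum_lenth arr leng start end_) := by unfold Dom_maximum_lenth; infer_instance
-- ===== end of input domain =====

-- B replaces A's O(n) scan per binary-search probe with sort + prefix sums + bisect (objective: faster).

-- ===== PORT A =====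
-- A's while-loop; the Nat fuel is a totality guard only: it starts at the interval
-- length (end - start + 1) and each iteration shrinks the interval, so it never runs out
def pvLoopA (arr : List Int) (leng : Int) : Nat → Int → Int → Option Int
  | 0, _, _ => none
  | fuel + 1, start, end_ =>
    if start ≤ end_ then
      let mid := PySem.Int.floordiv (start + end_) 2
      let total := arr.foldl (fun t l => if l > mid then t + (l - mid) else t) 0
      if total = leng then some mid
      else if total > leng then pvLoopA arr leng fuel (mid + 1) end_
      else pvLoopA arr leng fuel start (mid - 1)
    else none

def maximum_lenth (arr : List Int) (leng : Int) (start : Int) (end_ : Int) : Option Int :=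
  pvLoopA arr leng ((end_ - start + 1).toNat) start end_

-- ===== PORT B =====
-- port of Source B's hand-written _bisect_right; lo, hi are nonnegative Python ints, kept as Nat;
-- the Nat fuel (starting at hi - lo, halved each round) and the index-in-range test are
-- totality guards only: the index s[m] always satisfies lo ≤ m < hi ≤ len s
def pvBisect (s : List Int) (x : Int) : Nat → Nat → Nat → Nat
  | 0, lo, _ => lo
  | fuel + 1, lo, hi =>
    if lo < hi then
      let m := (lo + hi) / 2
      if hm : m < s.length then
        if s[m] ≤ x then pvBisect s x fuel (m + 1) hi else pvBisect s x fuel lo m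
      else lo
    else lo

-- port of Source B's prefix-sum construction loop: state is (pre, acc)
def pvPrefix (s : List Int) : List Int × Int :=
  s.foldl (fun p v => (p.1 ++ [p.2 + v], p.2 + v)) ([0], 0)

-- port of Source B's while-loop (after the one-time sort/prefix precomputation); fuel as in pvLoopA
def pvLoopB (s pre : List Int) (totalSum : Int) (n : Nat) (leng : Int) : Nat → Int → Int → Option Int
  | 0, _, _ => none
  | fuel + 1, start, end_ =>
    if start ≤ end_ then
      let mid := PySem.Int.floordiv (start + end_) 2
      let i := pvBisect s mid n 0 n
      let total := (totalSum - pre.getD i 0) - ((n : Int) - (i : Int)) * mid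
      if total = leng then some mid
      else if total > leng then pvLoopB s pre totalSum n leng fuel (mid + 1) end_
      else pvLoopB s pre totalSum n leng fuel start (mid - 1)
    else none

def maximum_lenth_alt (arr : List Int) (leng : Int) (start : Int) (end_ : Int) : Option Int :=
  let s := PySem.List.sorted arr id false
  let p := pvPrefix s
  pvLoopB s p.1 p.2 s.length leng ((end_ - start + 1).toNat) start end_

-- ===== PRECONDITION & SPEC =====
def Spec_maximum_lenth (arr : List Int) (leng : Int) (start : Int) (end_ : Int) (out : Option Int) : Prop := out = maximum_lenth_alt arr leng start end_
instance (arr : List Int) (leng : Int) (start : Int) (end_ : Int) (out : Option Int) : Decidable (Spec_maximum_lenth arr leng start end_ out) := by unfold Spec_maximum_lenth; infer_instance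

-- ===== CLAIM (what is proved, stated in full; the proofs are below) =====
def Claim_equal_maximum_lenth : Prop := ∀ (arr : List Int) (leng : Int) (start : Int) (end_ : Int), Dom_maximum_lenth arr leng start end_ → Spec_maximum_lenth arr leng start end_ (maximum_lenth arr leng start end_)

-- ===== LEMMAS AND PROOFS =====

-- A's inner scan computes the sum of the excesses over mid
theorem foldlA_eq_sum (arr : List Int) (mid t : Int) :
    arr.foldl (fun t l => if l > mid then t + (l - mid) else t) t
      = t + (arr.map (fun l => if l > mid then l - mid else 0)).sum := by
  induction arr generalizing t with
  | nil => simp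
  | cons v rest ih =>
    simp only [List.foldl_cons, List.map_cons, List.sum_cons, ih]
    split_ifs <;> ring

-- the spec of the hand-written bisect: on a sorted list it returns the first index whose element exceeds x
theorem pvBisect_spec (s : List Int) (x : Int)
    (hs : s.Pairwise (· ≤ ·)) :
    ∀ N lo hi, hi - lo ≤ N → lo ≤ hi → hi ≤ s.length →
    (∀ j (hj : j < s.length), j < lo → s[j] ≤ x) →
    (∀ j (hj : j < s.length), hi ≤ j → x < s[j]) →
    lo ≤ pvBisect s x N lo hi ∧ pvBisect s x N lo hi ≤ hi ∧
      (∀ j (hj : j < s.length), j < pvBisect s x N lo hi → s[j] ≤ x) ∧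
      (∀ j (hj : j < s.length), pvBisect s x N lo hi ≤ j → x < s[j]) := by
  intro N
  induction N with
  | zero =>
    intro lo hi hN hlh hhi hlow hhigh
    have : lo = hi := by omega
    simp only [pvBisect]
    exact ⟨le_rfl, by omega, hlow, fun j hj hr => hhigh j hj (by omega)⟩
  | succ N ih =>
    intro lo hi hN hlh hhi hlow hhigh
    simp only [pvBisect]
    by_cases hlt : lo < hi
    · simp only [hlt, if_true]
      have hm : (lo + hi) / 2 < s.length := by omega
      simp only [hm, dite_true]
      have hsorted := List.pairwise_iff_getElem.mp hs
      by_cases hc : s[(lo + hi) / 2] ≤ x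
      · simp only [hc, if_true]
        obtain ⟨h1, h2, h3, h4⟩ := ih ((lo + hi) / 2 + 1) hi (by omega) (by omega) hhi
          (fun j hj hjlt => by
            rcases Nat.lt_or_ge j ((lo + hi) / 2) with h' | h'
            · exact le_trans (hsorted j ((lo + hi) / 2) hj hm h') hc
            · have hje : j = (lo + hi) / 2 := by omega
              simpa [hje] using hc)
          hhigh
        exact ⟨by omega, h2, h3, h4⟩
      · simp only [hc, if_false]
        rw [not_le] at hc
        obtain ⟨h1, h2, h3, h4⟩ := ih lo ((lo + hi) / 2) (by omega) (by omega) (by omega) hlow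
          (fun j hj hge => by
            rcases Nat.lt_or_ge ((lo + hi) / 2) j with h'' | h''
            · exact lt_of_lt_of_le hc (hsorted ((lo + hi) / 2) j hm hj h'')
            · have hje : j = (lo + hi) / 2 := by omega
              simpa [hje] using hc)
        exact ⟨h1, by omega, h3, h4⟩
    · simp only [hlt, if_false]
      exact ⟨le_rfl, hlh, hlow, fun j hj hr => hhigh j hj (by omega)⟩

-- pvPrefix builds [0, sum(take 1), …, sum(take n)] and returns the total sum
theorem pvPrefix_fold (s pre0 : List Int) (acc : Int) :
    s.foldl (fun p v => (p.1 ++ [p.2 + v], p.2 + v)) (pre0, acc)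
      = (pre0 ++ (List.range s.length).map (fun k => acc + (s.take (k + 1)).sum), acc + s.sum) := by
  induction s generalizing pre0 acc with
  | nil => simp
  | cons v rest ih =>
    simp only [List.foldl_cons, ih, List.length_cons, List.range_succ_eq_map, List.map_cons,
      List.map_map, List.sum_cons]
    rw [Prod.mk.injEq]
    constructor
    · rw [List.append_assoc]
      congr 1
      · simp only [List.take_succ_cons, List.sum_cons, List.singleton_append]
        congr 1
        · simp
        · apply List.map_congr_left
          intro k _
          simp only [Function.comp_apply]
          ring
    · ring

theorem pvPrefix_getD (s : List Int) (i : Nat) (hi : i ≤ s.length) :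
    (pvPrefix s).1.getD i 0 = (s.take i).sum := by
  unfold pvPrefix
  rw [pvPrefix_fold]
  cases i with
  | zero => simp
  | succ k =>
    have hk : k < s.length := by omega
    have : ([(0 : Int)] ++ (List.range s.length).map (fun k => 0 + (s.take (k + 1)).sum)).getD (k + 1) 0
        = ((List.range s.length).map (fun k => 0 + (s.take (k + 1)).sum)).getD k 0 := by
      simp [List.getD]
    rw [this, List.getD_eq_getElem _ _ (by simpa using hk)]
    simp

theorem pvPrefix_snd (s : List Int) : (pvPrefix s).2 = s.sum := by
  unfold pvPrefix; rw [pvPrefix_fold]; simp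

-- on a list all of whose elements exceed mid, the excess-sum is sum - length*mid
theorem sum_excess_all_gt (l : List Int) (mid : Int) (h : ∀ y ∈ l, mid < y) :
    (l.map (fun v => if v > mid then v - mid else 0)).sum = l.sum - (l.length : Int) * mid := by
  induction l with
  | nil => simp
  | cons v rest ih =>
    have hv : mid < v := h v (by simp)
    simp only [List.map_cons, List.sum_cons, List.length_cons, if_pos hv,
      ih (fun y hy => h y (by simp [hy]))]
    push_cast; ring

-- B's probe value equals A's probe value, for every mid
theorem total_eq (arr : List Int) (mid : Int) :
    ((pvPrefix (PySem.List.sorted arr id false)).2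
        - (pvPrefix (PySem.List.sorted arr id false)).1.getD
            (pvBisect (PySem.List.sorted arr id false) mid (PySem.List.sorted arr id false).length 0 (PySem.List.sorted arr id false).length) 0)
      - (((PySem.List.sorted arr id false).length : Int)
          - (pvBisect (PySem.List.sorted arr id false) mid (PySem.List.sorted arr id false).length 0 (PySem.List.sorted arr id false).length : Int)) * mid
      = arr.foldl (fun t l => if l > mid then t + (l - mid) else t) 0 := by
  set s := PySem.List.sorted arr id false with hs
  have hperm : s.Perm arr := PySem.List.sorted_perm arr id false
  have hpair : s.Pairwise (· ≤ ·) := by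
    have := PySem.List.sorted_pairwise (xs := arr) (key := id)
    simpa [hs] using this
  obtain ⟨hr0, hrn, hle, hgt⟩ :=
    pvBisect_spec s mid hpair s.length 0 s.length (by omega) (by omega) le_rfl
      (fun j hj h => by omega) (fun j hj h => by omega)
  set r := pvBisect s mid s.length 0 s.length with hrdef
  rw [foldlA_eq_sum, pvPrefix_snd, pvPrefix_getD s r hrn]
  have hmap : (arr.map (fun l => if l > mid then l - mid else 0)).sum
      = (s.map (fun l => if l > mid then l - mid else 0)).sum :=
    (List.Perm.sum_eq ((hperm.map _))).symm
  rw [zero_add, hmap]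
  have hsplit : s = s.take r ++ s.drop r := (List.take_append_drop r s).symm
  have hsum : s.sum = (s.take r).sum + (s.drop r).sum := by
    conv_lhs => rw [hsplit]
    simp
  have htake0 : ((s.take r).map (fun l => if l > mid then l - mid else 0)).sum = 0 := by
    apply List.sum_eq_zero
    intro x hx
    simp only [List.mem_map] at hx
    obtain ⟨y, hy, hxy⟩ := hx
    obtain ⟨j, hj, hjy⟩ := List.mem_iff_getElem.mp hy
    have hjlen : j < s.length := by
      have := hj; simp [List.length_take] at this; omega
    have hjr : j < r := by
      have := hj; simp [List.length_take] at this; omega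
    have : (s.take r)[j] = s[j] := List.getElem_take
    have hle' : y ≤ mid := by rw [← hjy, this]; exact hle j hjlen hjr
    simp [← hxy, not_lt.mpr hle']
  have hdropgt : ∀ y ∈ s.drop r, mid < y := by
    intro y hy
    obtain ⟨j, hj, hjy⟩ := List.mem_iff_getElem.mp hy
    rw [List.getElem_drop] at hjy
    have hjl : r + j < s.length := by
      have := hj; simp [List.length_drop] at this; omega
    rw [← hjy]
    exact hgt (r + j) hjl (by omega)
  have hdrop := sum_excess_all_gt (s.drop r) mid hdropgt
  have hlendrop : ((s.drop r).length : Int) = (s.length : Int) - (r : Int) := by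
    simp [List.length_drop]; omega
  conv_rhs => rw [hsplit]
  rw [List.map_append, List.sum_append, htake0, hdrop, hlendrop]
  linarith [hsum]

-- the two binary-search loops agree once their probe values agree
theorem loops_agree (arr : List Int) (leng : Int) (s pre : List Int) (tS : Int) (n : Nat)
    (h : ∀ mid : Int,
      (tS - pre.getD (pvBisect s mid n 0 n) 0) - ((n : Int) - (pvBisect s mid n 0 n : Int)) * mid
        = arr.foldl (fun t l => if l > mid then t + (l - mid) else t) 0) :
    ∀ (N : Nat) (start end_ : Int),
      pvLoopA arr leng N start end_ = pvLoopB s pre tS n leng N start end_ := by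
  intro N
  induction N with
  | zero => intro start end_; rfl
  | succ N ih =>
    intro start end_
    simp only [pvLoopA, pvLoopB]
    by_cases hle : start ≤ end_
    · simp only [hle, if_true]
      rw [← h (PySem.Int.floordiv (start + end_) 2)]
      split_ifs with h1 h2
      · rfl
      · exact ih _ _
      · exact ih _ _
    · simp [hle]

-- ===== VERDICT (by name: the statement is the Claim_ definition above) =====
theorem maximum_lenth_spec : Claim_equal_maximum_lenth := by
  intro arr leng start end_ _
  unfold Spec_maximum_lenth maximum_lenth maximum_lenth_alt
  exact loops_agree arr leng _ _ _ _ (fun mid => total_eq arr mid)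
    ((end_ - start + 1).toNat) start end_
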